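-- pv_equiv track=rewrite | github.com/Sinstrus/compbio-projects | dna_engineer_agent/scripts/tools/tests/test_uniqueness_counting.py | count_sites_double_strand_correct
-- ===== SOURCE A (Python) =====
-- def reverse_complement(seq):
--     """Return the reverse complement of a DNA sequence."""
--     complement = {'A': 'T', 'T': 'A', 'G': 'C', 'C': 'G'}
--     return ''.join(complement[base] for base in reversed(seq))
--
-- def count_sites_double_strand_correct(sequence, site):
--     """
--     CORRECT implementation: counts on both strands.
--     For palindromic sites, this correctly counts both occurrences.
--     """
--     # Count forward strand
--     forward_count = 0
--     pos = 0
--     while True: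
--         pos = sequence.find(site, pos)
--         if pos == -1:
--             break
--         forward_count += 1
--         pos += 1
--
--     # Count reverse strand (reverse complement)
--     rc_site = reverse_complement(site)
--     reverse_count = 0
--     pos = 0
--     while True:
--         pos = sequence.find(rc_site, pos)
--         if pos == -1:
--             break
--         reverse_count += 1
--         pos += 1
--
--     # For palindromic sites, forward and reverse are the same
--     # So we need to avoid double counting
--     if site == rc_site:
--         # Palindromic: each occurrence is on both strands
--         return forward_count  # Each site is already counted on both strands
--     else:
--         # Non-palindromic: sum both counts
--         return forward_count + reverse_count
-- ===== SOURCE B (Python) =====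
-- def reverse_complement(seq):
--     """Return the reverse complement of a DNA sequence."""
--     complement = {'A': 'T', 'T': 'A', 'G': 'C', 'C': 'G'}
--     return ''.join(complement[base] for base in reversed(seq))
--
-- def count_sites_double_strand_correct(sequence, site):
--     """Single sliding-window pass: compare each window once against the
--     site and its reverse complement instead of two str.find loops."""
--     rc_site = reverse_complement(site)
--     m = len(site)
--     forward_count = 0
--     reverse_count = 0
--     for i in range(len(sequence) - m + 1):
--         window = sequence[i:i + m]
--         if window == site:
--             forward_count += 1
--         if window == rc_site:
--             reverse_count += 1
--     return forward_count if site == rc_site else forward_count + reverse_count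
-- ===== Notes on version B (the rewrite author's own statement) =====
-- stated objective: alternative
-- what changed: Replaces the two separate str.find scanning loops with a single positional sliding-window pass that compares each length-m window once against the site and once against its reverse complement.
import Mathlib
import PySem

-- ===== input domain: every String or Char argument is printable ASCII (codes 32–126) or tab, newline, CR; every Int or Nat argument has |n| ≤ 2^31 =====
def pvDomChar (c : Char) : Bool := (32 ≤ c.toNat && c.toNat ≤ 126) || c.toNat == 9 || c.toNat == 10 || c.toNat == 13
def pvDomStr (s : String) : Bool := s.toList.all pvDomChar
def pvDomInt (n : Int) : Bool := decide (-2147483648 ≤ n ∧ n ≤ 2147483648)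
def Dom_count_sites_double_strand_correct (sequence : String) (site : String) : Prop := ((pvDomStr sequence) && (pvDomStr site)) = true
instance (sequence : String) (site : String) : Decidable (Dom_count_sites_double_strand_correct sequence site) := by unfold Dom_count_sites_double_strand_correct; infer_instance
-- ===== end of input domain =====

-- B replaces A's two str.find scanning loops by one positional sliding-window pass
-- (a different decomposition of the same count; not claimed faster).

-- ===== PORT A =====
-- complement[base]: none models Python's KeyError on a base outside ACGT
def pvComp? (c : Char) : Option Char :=
  if c = 'A' then some 'T'
  else if c = 'T' then some 'A'
  else if c = 'G' then some 'C'
  else if c = 'C' then some 'G'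
  else none

-- reverse_complement(seq); none propagates the KeyError
def pvRevComp? (seq : String) : Option String :=
  (seq.toList.reverse.mapM pvComp?).map String.ofList

-- the 'while True: pos = sequence.find(site, pos); …; pos += 1' loop;
-- the fuel only makes the recursion total: each iteration moves pos past the
-- previous hit, so length + 2 iterations always suffice
def pvFindLoop (sequence site : String) : Nat → Int → Int
  | 0, _ => 0
  | fuel + 1, pos =>
      let p := PySem.Str.findFrom sequence site pos none
      if p = -1 then 0 else 1 + pvFindLoop sequence site fuel (p + 1)

def count_sites_double_strand_correct (sequence : String) (site : String) : Int :=
  let forward_count := pvFindLoop sequence site (sequence.toList.length + 2) 0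
  match pvRevComp? site with
  | none => 0   -- Python raises KeyError here; excluded by Pre_
  | some rc_site =>
    let reverse_count := pvFindLoop sequence rc_site (sequence.toList.length + 2) 0
    if site == rc_site then forward_count else forward_count + reverse_count

-- ===== PORT B =====
def count_sites_double_strand_correct_alt (sequence : String) (site : String) : Int :=
  match pvRevComp? site with
  | none => 0   -- Python raises KeyError here; excluded by Pre_
  | some rc_site =>
    let s := sequence.toList
    let m : Nat := site.toList.length
    let counts :=
      (PySem.List.pyRange 0 ((s.length : Int) - (m : Int) + 1) 1).foldl
        (fun (fr : Int × Int) i =>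
          let w := PySem.List.slice s (some i) (some (i + (m : Int)))
          ((if w = site.toList then fr.1 + 1 else fr.1),
           (if w = rc_site.toList then fr.2 + 1 else fr.2)))
        (0, 0)
    if site == rc_site then counts.1 else counts.1 + counts.2

-- ===== PRECONDITION & SPEC =====
-- Pre_ excludes exactly the inputs on which Python A raises KeyError:
-- a site containing a base outside 'ACGT' (reverse_complement's dict lookup fails).
def Pre_count_sites_double_strand_correct (sequence : String) (site : String) : Prop :=
  site.toList.all (fun c => c == 'A' || c == 'T' || c == 'G' || c == 'C') = true
instance (sequence : String) (site : String) : Decidable (Pre_count_sites_double_strand_correct sequence site) := by unfold Pre_count_sites_double_strand_correct; infer_instance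

def pvWitness_count_sites_double_strand_correct : String × String := ("GAATTCCA", "AT")

def Spec_count_sites_double_strand_correct (sequence : String) (site : String) (out : Int) : Prop := out = count_sites_double_strand_correct_alt sequence site
instance (sequence : String) (site : String) (out : Int) : Decidable (Spec_count_sites_double_strand_correct sequence site out) := by unfold Spec_count_sites_double_strand_correct; infer_instance

-- ===== CLAIM (what is proved, stated in full; the proofs are below) =====
def Claim_equal_count_sites_double_strand_correct : Prop := ∀ (sequence : String) (site : String), Dom_count_sites_double_strand_correct sequence site → Pre_count_sites_double_strand_correct sequence site → Spec_count_sites_double_strand_correct sequence site (count_sites_double_strand_correct sequence site)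

-- ===== LEMMAS AND PROOFS =====

-- number of positions i ≥ k at which sub occurs in s (overlapping occurrences)
def pvMatchCount (s sub : List Char) (k : Nat) : Nat :=
  ((List.range (s.length + 1)).drop k).countP (fun i => decide (sub <+: s.drop i))

lemma pvMatchCount_eq_range' (s sub : List Char) (k : Nat) :
    pvMatchCount s sub k
      = (List.range' k (s.length + 1 - k)).countP (fun i => decide (sub <+: s.drop i)) := by
  unfold pvMatchCount
  rw [List.range_eq_range', List.drop_range']
  simp

lemma pvFindFrom_past (s sub : List Char) (k : Nat) (h : s.length < k) :
    PySem.Chars.findFrom s sub (k : Int) none = -1 := by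
  unfold PySem.Chars.findFrom
  have h0 : ¬ ((k : Int) < 0) := by omega
  simp only [h0, if_false]
  rw [if_pos (by exact_mod_cast h)]

lemma pvMatchCount_zero_of_none (s sub : List Char) (k : Nat)
    (h : ¬ sub <:+: s.drop k) : pvMatchCount s sub k = 0 := by
  rw [pvMatchCount_eq_range']
  apply List.countP_eq_zero.2
  intro i hi
  rw [List.mem_range'_1] at hi
  simp only [decide_eq_true_eq]
  intro hpre
  apply h
  have hd : s.drop i = (s.drop k).drop (i - k) := by
    rw [List.drop_drop]; congr 1; omega
  exact (hpre.isInfix).trans (by rw [hd]; exact (List.drop_suffix _ _).isInfix)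

lemma pvFindLoop_eq (sequence site : String) (fuel k : Nat)
    (hk : k ≤ sequence.toList.length + 1)
    (hf : sequence.toList.length + 2 - k ≤ fuel) :
    pvFindLoop sequence site fuel (k : Int) =
      (pvMatchCount sequence.toList site.toList k : Int) := by
  induction fuel generalizing k with
  | zero => omega
  | succ fuel ih =>
    simp only [pvFindLoop, PySem.Str.findFrom_eq]
    by_cases hkL : k ≤ sequence.toList.length
    · by_cases h1 : PySem.Chars.findFrom sequence.toList site.toList (k : Int) none = -1
      · rw [if_pos h1, pvMatchCount_zero_of_none _ _ _
          ((PySem.Chars.findFrom_natCast_eq_neg_one_iff _ _ k hkL).1 h1)]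
        simp
      · obtain ⟨hkf, hpre, hmin⟩ :=
          PySem.Chars.findFrom_natCast_spec sequence.toList site.toList k hkL h1
        set f := PySem.Chars.findFrom sequence.toList site.toList (k : Int) none with hfdef
        set j := f.toNat with hjdef
        have hf0 : (0 : Int) ≤ f := by omega
        have hkj : k ≤ j := by omega
        have hjL : j ≤ sequence.toList.length := by
          by_cases hsub : site.toList = []
          · by_contra hcon
            exact hmin k le_rfl (by omega) (by simp [hsub])
          · have hlen := hpre.length_le
            rw [List.length_drop] at hlen
            have : 0 < site.toList.length := List.length_pos_iff.2 hsub
            omega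
        rw [if_neg h1]
        have hcast : f + 1 = ((j + 1 : Nat) : Int) := by omega
        have hb1 : j + 1 ≤ sequence.toList.length + 1 := by omega
        have hb2 : sequence.toList.length + 2 - (j + 1) ≤ fuel := by omega
        rw [hcast, ih (j + 1) hb1 hb2]
        have hcount : pvMatchCount sequence.toList site.toList k
            = pvMatchCount sequence.toList site.toList (j + 1) + 1 := by
          rw [pvMatchCount_eq_range', pvMatchCount_eq_range']
          have hsplit : List.range' k (sequence.toList.length + 1 - k)
              = List.range' k (j - k) ++ List.range' j (sequence.toList.length + 1 - j) := by
            have h2 : (j - k) + (sequence.toList.length + 1 - j)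
                = sequence.toList.length + 1 - k := by omega
            have h3 : k + 1 * (j - k) = j := by omega
            calc List.range' k (sequence.toList.length + 1 - k)
                = List.range' k ((j - k) + (sequence.toList.length + 1 - j)) := by rw [h2]
              _ = List.range' k (j - k) ++ List.range' (k + 1 * (j - k))
                    (sequence.toList.length + 1 - j) := (List.range'_append).symm
              _ = _ := by rw [h3]
          rw [hsplit, List.countP_append]
          have hz : (List.range' k (j - k)).countP
              (fun i => decide (site.toList <+: sequence.toList.drop i)) = 0 := by
            apply List.countP_eq_zero.2
            intro i hi
            rw [List.mem_range'_1] at hi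
            simp only [decide_eq_true_eq]
            exact hmin i hi.1 (by omega)
          have hsucc : sequence.toList.length + 1 - j
              = (sequence.toList.length - j) + 1 := by omega
          rw [hz, hsucc, List.range'_succ, List.countP_cons]
          have hpj : decide (site.toList <+: sequence.toList.drop j) = true := by
            simp [hpre]
          rw [hpj]
          have hrest : List.range' (j + 1) (sequence.toList.length - j)
              = List.range' (j + 1) (sequence.toList.length + 1 - (j + 1)) := by
            congr 1; omega
          rw [hrest]
          simp
        rw [hcount]
        push_cast
        ring
    · have hfneg : PySem.Chars.findFrom sequence.toList site.toList (k : Int) none = -1 :=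
        pvFindFrom_past _ _ k (by omega)
      rw [if_pos hfneg]
      rw [pvMatchCount_eq_range']
      have : sequence.toList.length + 1 - k = 0 := by omega
      rw [this]
      simp

lemma pvAlt_count_eq (s sub : List Char) (m : Nat) (hm : sub.length = m) :
    ((PySem.List.pyRange 0 ((s.length : Int) - (m : Int) + 1) 1).countP
      (fun i => decide (PySem.List.slice s (some i) (some (i + (m : Int))) = sub)))
    = pvMatchCount s sub 0 := by
  have hmc : pvMatchCount s sub 0
      = (List.range (s.length + 1)).countP (fun i => decide (sub <+: s.drop i)) := by
    unfold pvMatchCount; rw [List.drop_zero]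
  by_cases hms : m ≤ s.length
  · have hc : (s.length : Int) - (m : Int) + 1 = ((s.length - m + 1 : Nat) : Int) := by
      push_cast; omega
    rw [hc, PySem.List.pyRange_of_pos 0 _ (by norm_num), List.countP_map]
    have hpos : (0 : Int) < ((s.length - m + 1 : Nat) : Int) := by positivity
    rw [if_pos (by omega)]
    have hn : (((s.length - m + 1 : Nat) : Int) - 0 + 1 - 1) / 1 = ((s.length - m + 1 : Nat) : Int) := by
      omega
    rw [hn, Int.toNat_natCast]
    have hL : (List.range (s.length + 1)).countP (fun i => decide (sub <+: s.drop i))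
        = (List.range (s.length - m + 1)).countP (fun i => decide (sub <+: s.drop i)) := by
      have hsplit : List.range (s.length + 1)
          = List.range' 0 (s.length - m + 1) ++ List.range' (s.length - m + 1) m := by
        rw [List.range_eq_range']
        have h3 : 0 + 1 * (s.length - m + 1) = s.length - m + 1 := by omega
        calc List.range' 0 (s.length + 1)
            = List.range' 0 ((s.length - m + 1) + m) := by congr 1; omega
          _ = List.range' 0 (s.length - m + 1) ++ List.range' (0 + 1 * (s.length - m + 1)) m :=
              (List.range'_append).symm
          _ = _ := by rw [h3]
      rw [hsplit, List.countP_append, List.range_eq_range']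
      have hz : (List.range' (s.length - m + 1) m).countP
          (fun i => decide (sub <+: s.drop i)) = 0 := by
        apply List.countP_eq_zero.2
        intro i hi
        rw [List.mem_range'_1] at hi
        simp only [decide_eq_true_eq]
        intro hpre
        have := hpre.length_le
        rw [List.length_drop] at this
        omega
      rw [hz]
      omega
    rw [hmc, hL]
    apply List.countP_congr
    intro i hi
    have hslice : PySem.List.slice s (some (i : Int)) (some ((i : Int) + (m : Int)))
        = (s.drop i).take m := PySem.List.slice_natCast_add s i m
    simp only [Function.comp, zero_add, one_mul, hslice, decide_eq_true_eq]
    constructor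
    · intro h; rw [List.prefix_iff_eq_take, hm]; exact h.symm
    · intro h; rw [List.prefix_iff_eq_take, hm] at h; exact h.symm
  · rw [PySem.List.pyRange_one_eq_nil (by omega)]
    rw [hmc]
    symm
    apply List.countP_eq_zero.2
    intro i hi
    rw [List.mem_range] at hi
    simp only [decide_eq_true_eq]
    intro hpre
    have := hpre.length_le
    rw [List.length_drop] at this
    omega

lemma pvMapM_length : ∀ (l l' : List Char), l.mapM pvComp? = some l' → l'.length = l.length := by
  intro l
  induction l with
  | nil => intro l' h; simp at h; subst h; rfl
  | cons a t ih =>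
    intro l' h
    rw [List.mapM_cons] at h
    cases hc : pvComp? a with
    | none => rw [hc] at h; simp at h
    | some b =>
      rw [hc] at h
      cases ht : t.mapM pvComp? with
      | none => rw [ht] at h; simp at h
      | some l'' =>
        rw [ht] at h
        simp only [Option.bind_eq_bind, Option.pure_def, Option.bind_some,
          Option.some.injEq] at h
        subst h
        simp [ih l'' ht]

lemma pvRevComp_length (seq rc : String) (h : pvRevComp? seq = some rc) :
    rc.toList.length = seq.toList.length := by
  unfold pvRevComp? at h
  cases hmm : seq.toList.reverse.mapM pvComp? with
  | none => rw [hmm] at h; simp at h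
  | some l =>
    rw [hmm] at h
    simp only [Option.map_some, Option.some.injEq] at h
    have := pvMapM_length _ _ hmm
    rw [← h]
    simp at this ⊢
    omega

-- ===== VERDICT (by name: the statement is the Claim_ definition above) =====
theorem count_sites_double_strand_correct_spec : Claim_equal_count_sites_double_strand_correct := by
  intro sequence site _ _
  unfold Spec_count_sites_double_strand_correct
  unfold count_sites_double_strand_correct count_sites_double_strand_correct_alt
  cases hrc : pvRevComp? site with
  | none => rfl
  | some rc =>
    simp only []
    rw [PySem.List.foldl_prod_mk
      (f := fun (acc : Int) (i : Int) =>
        if PySem.List.slice sequence.toList (some i) (some (i + (site.toList.length : Int)))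
            = site.toList then acc + 1 else acc)
      (g := fun (acc : Int) (i : Int) =>
        if PySem.List.slice sequence.toList (some i) (some (i + (site.toList.length : Int)))
            = rc.toList then acc + 1 else acc)]
    rw [PySem.List.foldl_ite_add_one, PySem.List.foldl_ite_add_one]
    rw [pvAlt_count_eq sequence.toList site.toList site.toList.length rfl]
    rw [pvAlt_count_eq sequence.toList rc.toList site.toList.length
      (pvRevComp_length site rc hrc)]
    have hF := pvFindLoop_eq sequence site (sequence.toList.length + 2) 0 (by omega) (by omega)
    have hR := pvFindLoop_eq sequence rc (sequence.toList.length + 2) 0 (by omega) (by omega)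
    simp only [Nat.cast_zero] at hF hR
    rw [hF, hR]
    split <;> ring
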